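-- pv_equiv track=rewrite | github.com/akathorn/codejam | crepe.py | solve_axis
-- ===== SOURCE A (Python) =====
-- from typing import Any, Callable, Dict, List, NamedTuple, Tuple, TypeVar, Union
--
-- Person = Tuple[int, int]
--
-- def solve_axis(persons: List[Person], Q: int) -> int:
--     # TODO: optimize by saving as intervals
--     count = [0] * (Q + 1)
--     for person in persons:
--         intersection = person[0] + person[1]
--         while 0 <= intersection <= Q:
--             count[intersection] += 1
--             intersection = intersection + person[1]
--     return count.index(max(count))
-- ===== SOURCE B (Python) =====
-- def solve_axis(persons, Q):
--     # Closed-form per-cell counting instead of simulating each arithmetic progression.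
--     def cnt(x):
--         c = 0
--         for p0, s in persons:
--             start = p0 + s
--             if s > 0:
--                 if 0 <= start <= x and (x - start) % s == 0:
--                     c += 1
--             elif s < 0:
--                 if x <= start <= Q and (x - start) % s == 0:
--                     c += 1
--         return c
--     counts = [cnt(x) for x in range(Q + 1)]
--     return counts.index(max(counts))
-- ===== Notes on version B (the rewrite author's own statement) =====
-- stated objective: alternative
-- what changed: B replaces A's per-person while-loop simulation that mutates a count array along each arithmetic progression by a closed-form per-cell divisibility/bounds test, building the count list by a comprehension over 0..Q with no mutation.
import Mathlib
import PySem

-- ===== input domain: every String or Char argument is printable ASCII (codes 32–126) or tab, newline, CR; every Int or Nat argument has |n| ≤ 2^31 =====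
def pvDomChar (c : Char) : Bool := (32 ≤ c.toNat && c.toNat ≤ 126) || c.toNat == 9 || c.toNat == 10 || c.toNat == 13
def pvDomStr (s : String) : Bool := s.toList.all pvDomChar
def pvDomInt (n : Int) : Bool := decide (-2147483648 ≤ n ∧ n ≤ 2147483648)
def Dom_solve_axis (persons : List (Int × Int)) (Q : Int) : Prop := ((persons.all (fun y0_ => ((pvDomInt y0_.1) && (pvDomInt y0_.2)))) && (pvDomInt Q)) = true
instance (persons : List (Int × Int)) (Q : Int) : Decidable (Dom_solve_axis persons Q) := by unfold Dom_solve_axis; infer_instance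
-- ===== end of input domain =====

-- B replaces A's per-person while-loop simulation (mutating a count array along each
-- arithmetic progression) by a closed-form divisibility test evaluated per cell; same
-- cost class, different algorithm (objective: alternative).

-- ===== PORT A =====
-- the while-loop: fuel is an artifact of totality; when the step is nonzero the loop
-- performs at most Q+1 iterations (distinct positions in [0,Q]), so fuel (Q+2).toNat
-- never runs out on inputs admitted by Pre_.
def pvLoopA : Nat → Int → Int → Int → Array Int → Array Int
  | 0, _, _, _, count => count
  | fuel+1, inter, s, Q, count =>
    if 0 ≤ inter ∧ inter ≤ Q then
      pvLoopA fuel (inter + s) s Q (count.modify inter.toNat (· + 1))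
    else count

def solve_axis (persons : List (Int × Int)) (Q : Int) : Int :=
  let count := Array.replicate (Q + 1).toNat (0 : Int)
  let count := persons.foldl
    (fun cnt person => pvLoopA (Q + 2).toNat (person.1 + person.2) person.2 Q cnt) count
  match PySem.List.max? count.toList (fun y => y) with
  | some m =>
    match PySem.List.index? count.toList m with
    | some i => (i : Int)
    | none => 0          -- unreachable: the maximum is a member
  | none => 0            -- Python raises ValueError on an empty list (Q < 0); excluded by Pre_

-- ===== PORT B =====
def pvCnt (persons : List (Int × Int)) (Q x : Int) : Int :=
  persons.foldl
    (fun c p =>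
      let start := p.1 + p.2
      if p.2 > 0 then
        if 0 ≤ start ∧ start ≤ x ∧ PySem.Int.mod (x - start) p.2 = 0 then c + 1 else c
      else if p.2 < 0 then
        if x ≤ start ∧ start ≤ Q ∧ PySem.Int.mod (x - start) p.2 = 0 then c + 1 else c
      else c)
    0

def solve_axis_alt (persons : List (Int × Int)) (Q : Int) : Int :=
  let counts := (PySem.List.pyRange 0 (Q + 1) 1).map (pvCnt persons Q)
  match PySem.List.max? counts (fun y => y) with
  | some m =>
    match PySem.List.index? counts m with
    | some i => (i : Int)
    | none => 0
  | none => 0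

-- ===== PRECONDITION & SPEC =====
-- Pre_ excludes exactly the inputs on which Python A does not return: Q < 0 (max() of the
-- empty count list raises ValueError) and a person with step 0 whose start 0 ≤ p0 ≤ Q
-- (the while-loop never terminates).
def Pre_solve_axis (persons : List (Int × Int)) (Q : Int) : Prop :=
  0 ≤ Q ∧ ∀ p ∈ persons, p.2 = 0 → (p.1 < 0 ∨ Q < p.1)
instance (persons : List (Int × Int)) (Q : Int) : Decidable (Pre_solve_axis persons Q) := by
  unfold Pre_solve_axis; infer_instance

def pvWitness_solve_axis : (List (Int × Int)) × Int := ([(0, 2), (1, -1), (5, 0)], 3)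

def Spec_solve_axis (persons : List (Int × Int)) (Q : Int) (out : Int) : Prop :=
  out = solve_axis_alt persons Q
instance (persons : List (Int × Int)) (Q : Int) (out : Int) : Decidable (Spec_solve_axis persons Q out) := by
  unfold Spec_solve_axis; infer_instance

-- ===== CLAIM (what is proved, stated in full; the proofs are below) =====
def Claim_equal_solve_axis : Prop := ∀ (persons : List (Int × Int)) (Q : Int), Dom_solve_axis persons Q → Pre_solve_axis persons Q → Spec_solve_axis persons Q (solve_axis persons Q)

-- ===== LEMMAS AND PROOFS =====

-- the per-cell membership test, as a Bool predicate used by both characterizations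
def pvHit (Q x : Int) (p : Int × Int) : Bool :=
  if p.2 > 0 then
    decide (0 ≤ p.1 + p.2 ∧ p.1 + p.2 ≤ x ∧ p.2 ∣ (x - (p.1 + p.2)))
  else if p.2 < 0 then
    decide (x ≤ p.1 + p.2 ∧ p.1 + p.2 ≤ Q ∧ p.2 ∣ (x - (p.1 + p.2)))
  else false

theorem pvLoopA_size (fuel : Nat) (inter s Q : Int) (c : Array Int) :
    (pvLoopA fuel inter s Q c).size = c.size := by
  induction fuel generalizing inter c with
  | zero => rfl
  | succ n ih =>
    simp only [pvLoopA]
    split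
    · rw [ih]; simp
    · rfl

theorem pvLoopA_getD_pos (s Q x : Int) (hs : 1 ≤ s) (hx0 : 0 ≤ x) (hxQ : x ≤ Q)
    (fuel : Nat) (pos : Int) (c : Array Int) (hlen : c.size = (Q + 1).toNat)
    (hfuel : (Q + 1 - pos).toNat < fuel ∨ (pos < 0 ∧ 1 ≤ fuel)) :
    (getElem? (pvLoopA fuel pos s Q c) x.toNat).getD 0 =
      (getElem? c x.toNat).getD 0 + (if 0 ≤ pos ∧ pos ≤ x ∧ s ∣ (x - pos) then 1 else 0) := by
  induction fuel generalizing pos c with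
  | zero => omega
  | succ n ih =>
    simp only [pvLoopA]
    split
    case isTrue h =>
      rw [ih (pos + s) _ (by simp [hlen]) ?_]
      · have hxlt : x.toNat < c.size := by omega
        rw [Array.getElem?_modify, Array.getElem?_eq_getElem hxlt]
        by_cases hxp : x = pos
        · subst hxp
          have h1 : ¬(0 ≤ x + s ∧ x + s ≤ x ∧ s ∣ (x - (x + s))) := by
            rintro ⟨_, h2, _⟩; omega
          have h2 : (0 ≤ x ∧ x ≤ x ∧ s ∣ (x - x)) := ⟨hx0, le_refl x, by simp⟩
          rw [if_neg h1, if_pos h2]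
          simp
        · have ht : ¬(pos.toNat = x.toNat) := by omega
          have hcong : (0 ≤ pos + s ∧ pos + s ≤ x ∧ s ∣ (x - (pos + s))) ↔
              (0 ≤ pos ∧ pos ≤ x ∧ s ∣ (x - pos)) := by
            have hdvd : s ∣ (x - (pos + s)) ↔ s ∣ (x - pos) := by
              have e1 : x - pos = (x - (pos + s)) + s := by ring
              have e2 : x - (pos + s) = (x - pos) - s := by ring
              constructor
              · intro hd; rw [e1]; exact dvd_add hd (dvd_refl s)
              · intro hd; rw [e2]; exact dvd_sub hd (dvd_refl s)
            constructor
            · rintro ⟨h1, h2, h3⟩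
              exact ⟨h.1, by omega, hdvd.mp h3⟩
            · rintro ⟨h1, h2, h3⟩
              have hpx : pos < x := lt_of_le_of_ne h2 (fun e => hxp e.symm)
              have hle : s ≤ x - pos := Int.le_of_dvd (by omega) h3
              exact ⟨by omega, by omega, hdvd.mpr h3⟩
          simp only [hcong]
          simp [ht]
      · rcases hfuel with hf | hf
        · left; omega
        · exact absurd h.1 (by omega)
    case isFalse h =>
      have hneg : ¬(0 ≤ pos ∧ pos ≤ x ∧ s ∣ (x - pos)) := by
        rintro ⟨h1, h2, _⟩; exact h ⟨h1, le_trans h2 hxQ⟩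
      rw [if_neg hneg]; ring

theorem pvLoopA_getD_neg (s Q x : Int) (hs : s ≤ -1) (hx0 : 0 ≤ x) (hxQ : x ≤ Q)
    (fuel : Nat) (pos : Int) (c : Array Int) (hlen : c.size = (Q + 1).toNat)
    (hfuel : (pos + 1).toNat < fuel ∨ (Q < pos ∧ 1 ≤ fuel)) :
    (getElem? (pvLoopA fuel pos s Q c) x.toNat).getD 0 =
      (getElem? c x.toNat).getD 0 + (if x ≤ pos ∧ pos ≤ Q ∧ s ∣ (x - pos) then 1 else 0) := by
  induction fuel generalizing pos c with
  | zero => omega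
  | succ n ih =>
    simp only [pvLoopA]
    split
    case isTrue h =>
      rw [ih (pos + s) _ (by simp [hlen]) ?_]
      · have hxlt : x.toNat < c.size := by omega
        rw [Array.getElem?_modify, Array.getElem?_eq_getElem hxlt]
        by_cases hxp : x = pos
        · subst hxp
          have h1 : ¬(x ≤ x + s ∧ x + s ≤ Q ∧ s ∣ (x - (x + s))) := by
            rintro ⟨h2, _, _⟩; omega
          have h2 : (x ≤ x ∧ x ≤ Q ∧ s ∣ (x - x)) := ⟨le_refl x, hxQ, by simp⟩
          rw [if_neg h1, if_pos h2]
          simp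
        · have ht : ¬(pos.toNat = x.toNat) := by omega
          have hcong : (x ≤ pos + s ∧ pos + s ≤ Q ∧ s ∣ (x - (pos + s))) ↔
              (x ≤ pos ∧ pos ≤ Q ∧ s ∣ (x - pos)) := by
            have hdvd : s ∣ (x - (pos + s)) ↔ s ∣ (x - pos) := by
              have e1 : x - pos = (x - (pos + s)) + s := by ring
              have e2 : x - (pos + s) = (x - pos) - s := by ring
              constructor
              · intro hd; rw [e1]; exact dvd_add hd (dvd_refl s)
              · intro hd; rw [e2]; exact dvd_sub hd (dvd_refl s)
            constructor
            · rintro ⟨h1, h2, h3⟩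
              exact ⟨by omega, h.2, hdvd.mp h3⟩
            · rintro ⟨h1, h2, h3⟩
              have hpx : x < pos := lt_of_le_of_ne h1 hxp
              have h4 : s ∣ (pos - x) := by
                have := h3.neg_right; simpa using this
              have hle : -s ≤ pos - x := Int.le_of_dvd (by omega) ((neg_dvd).mpr h4)
              exact ⟨by omega, by omega, hdvd.mpr h3⟩
          simp only [hcong]
          simp [ht]
      · rcases hfuel with hf | hf
        · left; omega
        · exact absurd h.2 (by omega)
    case isFalse h =>
      have hneg : ¬(x ≤ pos ∧ pos ≤ Q ∧ s ∣ (x - pos)) := by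
        rintro ⟨h1, h2, _⟩; exact h ⟨le_trans hx0 h1, h2⟩
      rw [if_neg hneg]; ring

theorem pvLoopA_person (Q x : Int) (p : Int × Int) (hQ : 0 ≤ Q) (hx0 : 0 ≤ x) (hxQ : x ≤ Q)
    (hp : p.2 = 0 → (p.1 < 0 ∨ Q < p.1)) (c : Array Int) (hlen : c.size = (Q + 1).toNat) :
    (getElem? (pvLoopA (Q + 2).toNat (p.1 + p.2) p.2 Q c) x.toNat).getD 0 =
      (getElem? c x.toNat).getD 0 + (if pvHit Q x p then 1 else 0) := by
  rcases lt_trichotomy p.2 0 with hs | hs | hs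
  · rw [pvLoopA_getD_neg p.2 Q x (by omega) hx0 hxQ _ _ _ hlen (by omega)]
    simp only [pvHit, if_neg (by omega : ¬ p.2 > 0), if_pos hs]
    congr 1
    by_cases hc : (x ≤ p.1 + p.2 ∧ p.1 + p.2 ≤ Q ∧ p.2 ∣ (x - (p.1 + p.2)))
    · rw [if_pos hc, if_pos (by simpa using hc)]
    · rw [if_neg hc, if_neg (by simpa using hc)]
  · have h0 : p.1 < 0 ∨ Q < p.1 := hp hs
    obtain ⟨k, hk⟩ : ∃ k, (Q + 2).toNat = k + 1 := ⟨(Q + 2).toNat - 1, by omega⟩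
    rw [hk]
    simp only [pvLoopA]
    have hc : ¬(0 ≤ p.1 + p.2 ∧ p.1 + p.2 ≤ Q) := by omega
    rw [if_neg hc]
    have hh : pvHit Q x p = false := by simp [pvHit, hs]
    rw [hh]
    simp
  · rw [pvLoopA_getD_pos p.2 Q x (by omega) hx0 hxQ _ _ _ hlen (by omega)]
    simp only [pvHit, if_pos hs]
    congr 1
    by_cases hc : (0 ≤ p.1 + p.2 ∧ p.1 + p.2 ≤ x ∧ p.2 ∣ (x - (p.1 + p.2)))
    · rw [if_pos hc, if_pos (by simpa using hc)]
    · rw [if_neg hc, if_neg (by simpa using hc)]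

theorem countA_size (Q : Int) (persons : List (Int × Int)) (c : Array Int) :
    (persons.foldl (fun cnt person =>
        pvLoopA (Q + 2).toNat (person.1 + person.2) person.2 Q cnt) c).size = c.size := by
  induction persons generalizing c with
  | nil => rfl
  | cons p ps ih => rw [List.foldl_cons, ih, pvLoopA_size]

theorem countA_getD (Q x : Int) (hQ : 0 ≤ Q) (hx0 : 0 ≤ x) (hxQ : x ≤ Q)
    (persons : List (Int × Int)) (hp : ∀ p ∈ persons, p.2 = 0 → (p.1 < 0 ∨ Q < p.1))
    (c : Array Int) (hlen : c.size = (Q + 1).toNat) :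
    (getElem? (persons.foldl (fun cnt person =>
        pvLoopA (Q + 2).toNat (person.1 + person.2) person.2 Q cnt) c) x.toNat).getD 0 =
      (getElem? c x.toNat).getD 0 + (persons.countP (pvHit Q x) : Int) := by
  induction persons generalizing c with
  | nil => simp
  | cons p ps ih =>
    rw [List.foldl_cons,
        ih (fun q hq => hp q (List.mem_cons_of_mem p hq)) _ (by rw [pvLoopA_size]; exact hlen),
        pvLoopA_person Q x p hQ hx0 hxQ (hp p (List.mem_cons_self ..)) c hlen,
        List.countP_cons]
    by_cases hh : pvHit Q x p <;> simp [hh] <;> ring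

theorem pvCnt_eq_countP (persons : List (Int × Int)) (Q x : Int) :
    pvCnt persons Q x = (persons.countP (pvHit Q x) : Int) := by
  unfold pvCnt
  suffices h : ∀ c0 : Int, persons.foldl
      (fun c p =>
        let start := p.1 + p.2
        if p.2 > 0 then
          if 0 ≤ start ∧ start ≤ x ∧ PySem.Int.mod (x - start) p.2 = 0 then c + 1 else c
        else if p.2 < 0 then
          if x ≤ start ∧ start ≤ Q ∧ PySem.Int.mod (x - start) p.2 = 0 then c + 1 else c
        else c)
      c0 = c0 + (persons.countP (pvHit Q x) : Int) by
    simpa using h 0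
  induction persons with
  | nil => simp
  | cons p ps ih =>
    intro c0
    rw [List.foldl_cons, ih, List.countP_cons]
    have hstep : (let start := p.1 + p.2
        if p.2 > 0 then
          if 0 ≤ start ∧ start ≤ x ∧ PySem.Int.mod (x - start) p.2 = 0 then c0 + 1 else c0
        else if p.2 < 0 then
          if x ≤ start ∧ start ≤ Q ∧ PySem.Int.mod (x - start) p.2 = 0 then c0 + 1 else c0
        else c0) = c0 + (if pvHit Q x p then 1 else 0) := by
      simp only [pvHit, PySem.Int.mod_eq_zero_iff_dvd]
      split_ifs <;> simp_all
    rw [hstep]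
    by_cases hh : pvHit Q x p <;> simp [hh] <;> ring

theorem count_lists_eq (persons : List (Int × Int)) (Q : Int) (hQ : 0 ≤ Q)
    (hp : ∀ p ∈ persons, p.2 = 0 → (p.1 < 0 ∨ Q < p.1)) :
    (persons.foldl (fun cnt person =>
        pvLoopA (Q + 2).toNat (person.1 + person.2) person.2 Q cnt)
      (Array.replicate (Q + 1).toNat (0 : Int))).toList =
    (PySem.List.pyRange 0 (Q + 1) 1).map (pvCnt persons Q) := by
  apply List.ext_getElem
  · rw [Array.length_toList, countA_size, Array.size_replicate, List.length_map,
        PySem.List.length_pyRange_one]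
    omega
  · intro i h1 h2
    set F := persons.foldl (fun cnt person =>
        pvLoopA (Q + 2).toNat (person.1 + person.2) person.2 Q cnt)
      (Array.replicate (Q + 1).toNat (0 : Int)) with hF
    have hi : i < (Q + 1).toNat := by
      rw [Array.length_toList, hF, countA_size, Array.size_replicate] at h1; exact h1
    have hsz : i < F.size := by rw [hF, countA_size, Array.size_replicate]; exact hi
    have hx0 : (0 : Int) ≤ (i : Int) := by positivity
    have hxQ : (i : Int) ≤ Q := by omega
    have htn : ((i : Int)).toNat = i := by omega
    have hA := countA_getD Q (i : Int) hQ hx0 hxQ persons hp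
      (Array.replicate (Q + 1).toNat (0 : Int)) (by simp)
    rw [htn] at hA
    have hrep : (getElem? (Array.replicate (Q + 1).toNat (0 : Int)) i).getD 0 = 0 := by
      simp [hi]
    rw [hrep, ← hF] at hA
    have hval : (getElem? F i).getD 0 = F[i] := by
      rw [Array.getElem?_eq_getElem hsz]; rfl
    rw [List.getElem_map, PySem.List.getElem_pyRange_one, pvCnt_eq_countP,
        Array.getElem_toList, ← hval, hA]
    simp

-- ===== VERDICT (by name: the statement is the Claim_ definition above) =====
theorem solve_axis_spec : Claim_equal_solve_axis := by
  intro persons Q _ hpre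
  unfold Spec_solve_axis solve_axis solve_axis_alt
  simp only [count_lists_eq persons Q hpre.1 hpre.2]
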